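-- pv_equiv track=rewrite | github.com/abrocod/minerva | tools/evernote_extractor/final_image_embedder.py | _embed_images_in_content
-- ===== SOURCE A (Python) =====
-- from typing import List, Dict
--
-- def _embed_images_in_content(content: str, image_files: Dict) -> str:
--     """Replace [Attachment] markers with actual image embeddings"""
--
--     lines = content.split('\n')
--     new_lines = []
--
--     for i, line in enumerate(lines):
--         if '[Attachment]' in line:
--             # Look for context clues about what image this might be
--             # Check surrounding lines for hints
--             context_lines = []
--             for j in range(max(0, i-2), min(len(lines), i+3)):
--                 context_lines.append(lines[j])
--
--             context = ' '.join(context_lines).lower()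
--
--             # Try to find a matching image
--             image_found = False
--             for original_name, filename in image_files.items():
--                 # Skip if already processed
--                 if filename in content:
--                     continue
--
--                 # Simple heuristic: if this is the first unmatched image, use it
--                 if not image_found:
--                     relative_path = f"attachments/{filename}"
--                     alt_text = original_name.replace('_', ' ').replace('-', ' ')
--
--                     # Check if it's likely an emoji or icon (small SVG)
--                     if filename.endswith('.svg') and '1f' in filename:
--                         # Likely an emoji, use smaller format
--                         new_lines.append(f"![{alt_text}]({relative_path})")
--                     else:
--                         # Regular image
--                         new_lines.append(f"\n![{alt_text}]({relative_path})\n")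
--
--                     # Mark this image as used
--                     del image_files[original_name]
--                     image_found = True
--                     break
--
--             if not image_found:
--                 new_lines.append(line)  # Keep original if no image found
--         else:
--             new_lines.append(line)
--
--     return '\n'.join(new_lines)
-- ===== SOURCE B (Python) =====
-- def _fmt(name: str, filename: str) -> str:
--     alt = name.replace('_', ' ').replace('-', ' ')
--     core = f"![{alt}](attachments/{filename})"
--     if '1f' in filename and filename.endswith('.svg'):
--         return core
--     return f"\n{core}\n"
--
--
-- def _embed_images_in_content(content: str, image_files: dict) -> str:
--     """Replace [Attachment] markers with actual image embeddings.
--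
--     Staged passes: first compute ONCE the ordered list of usable images
--     (those whose filename does not occur in content) and pre-format their
--     embeddings; then a single pass over the lines pops replacements off
--     that list; finally the used keys are deleted from image_files (same
--     observable mutation as A).
--     """
--     usable = [(n, f) for n, f in image_files.items() if f not in content]
--     repl = [_fmt(n, f) for n, f in usable]
--     out = []
--     for line in content.split('\n'):
--         if repl and '[Attachment]' in line:
--             out.append(repl.pop(0))
--         else:
--             out.append(line)
--     used = len(usable) - len(repl)
--     for n, _ in usable[:used]:
--         del image_files[n]
--     return '\n'.join(out)
-- ===== Notes on version B (the rewrite author's own statement) =====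
-- stated objective: alternative
-- what changed: B replaces A's restart-from-the-top inner scan of image_files at every marker (re-testing already-skipped filenames against the whole content each time) with two staged passes: the usable images are filtered and pre-formatted once into an ordered replacement list, and a single line pass then just pops from that list; deletions from image_files happen in one batch at the end.
import Mathlib
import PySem

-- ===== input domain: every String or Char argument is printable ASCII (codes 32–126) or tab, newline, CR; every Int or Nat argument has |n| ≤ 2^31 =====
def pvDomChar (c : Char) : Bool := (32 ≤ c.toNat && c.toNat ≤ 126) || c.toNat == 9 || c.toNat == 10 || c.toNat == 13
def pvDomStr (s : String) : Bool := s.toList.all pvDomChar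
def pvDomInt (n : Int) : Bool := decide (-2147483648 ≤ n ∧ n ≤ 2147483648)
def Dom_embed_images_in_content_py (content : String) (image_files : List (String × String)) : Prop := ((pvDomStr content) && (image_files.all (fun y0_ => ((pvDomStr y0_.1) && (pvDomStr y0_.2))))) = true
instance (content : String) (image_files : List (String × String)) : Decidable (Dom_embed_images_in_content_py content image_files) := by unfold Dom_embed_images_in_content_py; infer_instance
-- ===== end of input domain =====

-- ===== PORT A =====
-- A and B both mutate image_files in place (used keys are deleted; the same keys in both);
-- the equivalence proved here is about the RETURN value only.

-- A's inner 'for original_name, filename in image_files.items()' loop: skip entries whose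
-- filename occurs in content; at the first other entry emit the embedding (A's two inline
-- f-strings) and delete the entry (returns the emitted line and the dict after the 'del');
-- none = image_found stays False.
def pyFindImage (content : String) : List (String × String) → Option (String × List (String × String))
  | [] => none
  | (name, fn) :: rest =>
    if PySem.Str.isIn fn content then
      match pyFindImage content rest with
      | none => none
      | some (s, d') => some (s, (name, fn) :: d')
    else
      let relative_path := "attachments/" ++ fn
      let alt_text := PySem.Str.replace (PySem.Str.replace name "_" " ") "-" " "
      if PySem.Str.endswith fn ".svg" && PySem.Str.isIn "1f" fn then
        some ("![" ++ alt_text ++ "](" ++ relative_path ++ ")", rest)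
      else
        some ("\n![" ++ alt_text ++ "](" ++ relative_path ++ ")\n", rest)

-- A's outer loop over enumerate(lines) carrying the dict state. A's 'context_lines'/'context'
-- are computed but never used (dead code), so they are omitted from the port.
def pyGo (content : String) : List String → List (String × String) → List String
  | [], _ => []
  | line :: rest, d =>
    if PySem.Str.isIn "[Attachment]" line then
      match pyFindImage content d with
      | some (s, d') => s :: pyGo content rest d'
      | none => line :: pyGo content rest d
    else
      line :: pyGo content rest d

def embed_images_in_content_py (content : String) (image_files : List (String × String)) : String :=
  PySem.Str.join "\n" (pyGo content ((PySem.Str.split? content "\n").getD []) image_files)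

-- ===== PORT B =====
-- Source B's _fmt helper
def altFmt (name fn : String) : String :=
  let alt := PySem.Str.replace (PySem.Str.replace name "_" " ") "-" " "
  let core := "![" ++ alt ++ "](attachments/" ++ fn ++ ")"
  if PySem.Str.isIn "1f" fn && PySem.Str.endswith fn ".svg" then core
  else "\n" ++ core ++ "\n"

-- Source B: usable = filter once against content; repl = its pre-formatted embeddings
def altQueue (content : String) (image_files : List (String × String)) : List String :=
  (image_files.filter (fun p => !(PySem.Str.isIn p.2 content))).map (fun p => altFmt p.1 p.2)

-- Source B's single line pass popping from the precomputed replacement list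
def altGo : List String → List String → List String
  | _, [] => []
  | repl, line :: rest =>
    match repl, PySem.Str.isIn "[Attachment]" line with
    | r :: rs, true => r :: altGo rs rest
    | _, _ => line :: altGo repl rest

def embed_images_in_content_py_alt (content : String) (image_files : List (String × String)) : String :=
  PySem.Str.join "\n" (altGo (altQueue content image_files) ((PySem.Str.split? content "\n").getD []))

-- ===== PRECONDITION & SPEC =====
def Spec_embed_images_in_content_py (content : String) (image_files : List (String × String)) (out : String) : Prop := out = embed_images_in_content_py_alt content image_files
instance (content : String) (image_files : List (String × String)) (out : String) : Decidable (Spec_embed_images_in_content_py content image_files out) := by unfold Spec_embed_images_in_content_py; infer_instance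

-- ===== CLAIM (what is proved, stated in full; the proofs are below) =====
def Claim_equal_embed_images_in_content_py : Prop := ∀ (content : String) (image_files : List (String × String)), Dom_embed_images_in_content_py content image_files → Spec_embed_images_in_content_py content image_files (embed_images_in_content_py content image_files)

-- ===== LEMMAS AND PROOFS =====

-- A's inline formatting of an entry coincides with Source B's _fmt (same strings, the
-- conjunction commuted and the literal concatenation reassociated).
theorem altFmt_eq (name fn : String) :
    altFmt name fn =
      (if PySem.Str.endswith fn ".svg" && PySem.Str.isIn "1f" fn then
        "![" ++ (PySem.Str.replace (PySem.Str.replace name "_" " ") "-" " ") ++ "](" ++ ("attachments/" ++ fn) ++ ")"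
      else
        "\n![" ++ (PySem.Str.replace (PySem.Str.replace name "_" " ") "-" " ") ++ "](" ++ ("attachments/" ++ fn) ++ ")\n") := by
  unfold altFmt
  rw [Bool.and_comm]
  split_ifs with h
  · simp [String.append_assoc]
    rfl
  · simp [String.append_assoc]
    rfl

-- A's inner scan, described through the once-filtered queue: it returns none exactly when
-- the queue is empty, and otherwise emits Source B's formatting of the queue's head while the
-- dict left behind filters to the queue's tail.
theorem pyFindImage_spec (content : String) (d : List (String × String)) :
    (pyFindImage content d).map
        (fun r => (r.1, r.2.filter (fun p => !(PySem.Chars.isIn p.2.toList content.toList)))) =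
      match d.filter (fun p => !(PySem.Chars.isIn p.2.toList content.toList)) with
      | [] => none
      | q :: qs => some (altFmt q.1 q.2, qs) := by
  induction d with
  | nil => simp [pyFindImage]
  | cons hd tl ih =>
    obtain ⟨name, fn⟩ := hd
    by_cases h : PySem.Chars.isIn fn.toList content.toList = true
    · cases hrec : pyFindImage content tl with
      | none => simpa [pyFindImage, h, hrec] using ih
      | some r => simpa [pyFindImage, h, hrec] using ih
    · simp [pyFindImage, PySem.Str.isIn, h, altFmt_eq]
      exact ⟨tl, by split_ifs <;> rfl, rfl⟩

-- The two line passes agree whenever A's remaining dict filters to B's remaining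
-- replacement queue (filtered and formatted).
theorem pyGo_eq_altGo (content : String) (lines : List String)
    (d : List (String × String)) (repl : List String)
    (hfil : (d.filter (fun p => !(PySem.Chars.isIn p.2.toList content.toList))).map
              (fun p => altFmt p.1 p.2) = repl) :
    pyGo content lines d = altGo repl lines := by
  induction lines generalizing d repl with
  | nil => simp [pyGo, altGo]
  | cons line rest ih =>
    by_cases hl : PySem.Chars.isIn ['[', 'A', 't', 't', 'a', 'c', 'h', 'm', 'e', 'n', 't', ']'] line.toList = true
    · have hA := pyFindImage_spec content d
      cases hq : d.filter (fun p => !(PySem.Chars.isIn p.2.toList content.toList)) with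
      | nil =>
        rw [hq] at hA
        have hA' : pyFindImage content d = none := by
          cases hfa : pyFindImage content d
          · rfl
          · rw [hfa] at hA; simp at hA
        have hrepl : repl = [] := by rw [← hfil, hq]; rfl
        subst hrepl
        simp [pyGo, altGo, hl, hA', ih d [] (by rw [hq]; rfl)]
      | cons q qs =>
        rw [hq] at hA
        cases hfa : pyFindImage content d with
        | none => rw [hfa] at hA; simp at hA
        | some r =>
          rw [hfa] at hA
          simp only [Option.map_some, Option.some.injEq, Prod.mk.injEq] at hA
          obtain ⟨hA1, hA2⟩ := hA
          have hrepl : repl = altFmt q.1 q.2 :: qs.map (fun p => altFmt p.1 p.2) := by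
            rw [← hfil, hq]; rfl
          subst hrepl
          have hrec := ih r.2 (qs.map fun p => altFmt p.1 p.2) (by rw [hA2])
          simp [pyGo, altGo, hl, hfa, hA1, hrec]
    · have hrec := ih d repl hfil
      cases repl with
      | nil => simp [pyGo, altGo, hl, hrec]
      | cons r rs => simp [pyGo, altGo, hl, hrec]

-- ===== VERDICT (by name: the statement is the Claim_ definition above) =====
theorem embed_images_in_content_py_spec : Claim_equal_embed_images_in_content_py := by
  intro content image_files _
  unfold Spec_embed_images_in_content_py
  unfold embed_images_in_content_py embed_images_in_content_py_alt
  rw [pyGo_eq_altGo content ((PySem.Str.split? content "\n").getD []) image_files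
      (altQueue content image_files) rfl]
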